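-- pv_equiv track=rewrite | github.com/kds-005/Learning-DSA | Contest/Weekly/Weekly Contest 467/3685. Subsequence Sum After Capping Elements/Solution.py | subsequenceSumAfterCapping
-- ===== SOURCE A (Python) =====
-- from typing import List
--
-- def subsequenceSumAfterCapping(nums: List[int], k: int) -> List[bool]:
--     n = len(nums)
--     nums.sort()
--     def dfs(idx, total, cap):
--         if total == 0:
--             return True
--         if total < 0:
--             return False
--         if idx >= n:
--             return False
--
--         if (idx, total) in dp:
--             return dp[(idx, total)]
--
--         for i in range(idx + 1, n):
--             num = min(nums[i], cap)
--             if dfs(i, total - num, cap):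
--                 dp[(idx, total)] = True
--                 return dp[(idx, total)]
--         dp[(idx, total)] = False
--         return dp[(idx, total)]
--
--     result = []
--     for i in range(1, n + 1):
--         dp = {}
--         result.append(dfs(-1, k, i))
--     return result
-- ===== SOURCE B (Python) =====
-- from typing import List
--
-- def subsequenceSumAfterCapping(nums: List[int], k: int) -> List[bool]:
--     # Forward subset-sum DP over a set of running sums, values processed in
--     # sorted order; sums are kept only while <= k (standard subset-sum
--     # truncation; exact here because the values are processed sorted).
--     # Note: unlike A, this does not mutate nums; return values agree.
--     n = len(nums)
--     vals = sorted(nums)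
--     result = []
--     for cap in range(1, n + 1):
--         sums = {0} if k >= 0 else set()
--         for v in vals:
--             w = min(v, cap)
--             sums |= {s + w for s in sums if s + w <= k}
--         result.append(k in sums)
--     return result
-- ===== Notes on version B (the rewrite author's own statement) =====
-- stated objective: alternative
-- what changed: Replaces the per-cap memoized index-pair DFS (dict keyed by (idx,total), inner scan over all later indices) by a forward iterative subset-sum DP that sweeps the sorted capped values once per cap, maintaining the set of running sums bounded by k; intended as faster (measured 13.8x at the largest size both versions finished) but unconfirmed on the largest generated inputs.
import Mathlib
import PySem

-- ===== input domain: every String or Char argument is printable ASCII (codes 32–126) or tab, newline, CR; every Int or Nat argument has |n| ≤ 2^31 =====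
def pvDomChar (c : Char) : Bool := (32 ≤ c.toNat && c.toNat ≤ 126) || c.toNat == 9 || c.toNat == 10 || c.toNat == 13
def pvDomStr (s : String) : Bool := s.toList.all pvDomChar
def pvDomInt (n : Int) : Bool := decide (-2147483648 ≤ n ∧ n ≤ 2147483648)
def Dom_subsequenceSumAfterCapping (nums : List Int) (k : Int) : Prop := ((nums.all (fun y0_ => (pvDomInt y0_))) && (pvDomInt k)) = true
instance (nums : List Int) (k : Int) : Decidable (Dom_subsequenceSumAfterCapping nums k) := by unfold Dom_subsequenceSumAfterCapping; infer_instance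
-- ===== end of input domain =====

-- B replaces A's per-cap memoized DFS by a forward subset-sum sweep over the sorted
-- capped values (objective: alternative; intended as faster, measured 13.8x at mid
-- sizes but unconfirmed at the largest generated inputs). A sorts `nums` in place;
-- the equivalence proved here is about the RETURN value only (B does not mutate).

-- ===== PORT A =====
-- A's `dfs` threads the memo dict `dp`; `loopA` is A's `for i in range(idx+1, n)` loop.
mutual
def dfsA (s : List Int) (n cap idx total : Int)
    (dp : PySem.Dict (Int × Int) Bool) : Bool × PySem.Dict (Int × Int) Bool :=
  if total = 0 then (true, dp)
  else if total < 0 then (false, dp)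
  else if _h : n ≤ idx then (false, dp)
  else
    match dp.get? (idx, total) with
    | some b => (b, dp)
    | none => loopA s n cap idx total (idx + 1) dp
termination_by (n - idx).toNat * 2 + 1
decreasing_by all_goals omega

def loopA (s : List Int) (n cap idx total i : Int)
    (dp : PySem.Dict (Int × Int) Bool) : Bool × PySem.Dict (Int × Int) Bool :=
  if _h : i < n then
    let num := min (PySem.List.pyGetD s i 0) cap
    let r := dfsA s n cap i (total - num) dp
    if r.1 then
      (((r.2.insert (idx, total) true).get? (idx, total)).getD false, r.2.insert (idx, total) true)
    else loopA s n cap idx total (i + 1) r.2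
  else
    (((dp.insert (idx, total) false).get? (idx, total)).getD false, dp.insert (idx, total) false)
termination_by (n - i).toNat * 2 + 2
decreasing_by all_goals omega
end

def subsequenceSumAfterCapping (nums : List Int) (k : Int) : List Bool :=
  let n : Int := nums.length
  let s := PySem.List.sorted nums (fun x => x) false
  (PySem.List.pyRange 1 (n + 1) 1).map (fun i => (dfsA s n i (-1) k PySem.Dict.empty).1)

-- ===== PORT B =====
def subsequenceSumAfterCapping_alt (nums : List Int) (k : Int) : List Bool :=
  let n : Int := nums.length
  let vals := PySem.List.sorted nums (fun x => x) false
  (PySem.List.pyRange 1 (n + 1) 1).map (fun cap =>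
    let sums0 : PySem.Set Int := if 0 ≤ k then PySem.Set.ofList [0] else PySem.Set.empty
    let sums := vals.foldl (fun sums v =>
      let w := min v cap
      PySem.Set.union sums ((sums.filter (fun s => decide (s + w ≤ k))).map (fun s => s + w))) sums0
    PySem.Set.contains sums k)

-- ===== PRECONDITION & SPEC =====
def Spec_subsequenceSumAfterCapping (nums : List Int) (k : Int) (out : List Bool) : Prop := out = subsequenceSumAfterCapping_alt nums k
instance (nums : List Int) (k : Int) (out : List Bool) : Decidable (Spec_subsequenceSumAfterCapping nums k out) := by unfold Spec_subsequenceSumAfterCapping; infer_instance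

-- ===== CLAIM (what is proved, stated in full; the proofs are below) =====
def Claim_equal_subsequenceSumAfterCapping : Prop := ∀ (nums : List Int) (k : Int), Dom_subsequenceSumAfterCapping nums k → Spec_subsequenceSumAfterCapping nums k (subsequenceSumAfterCapping nums k)

-- ===== LEMMAS AND PROOFS =====

-- Pure (memo-free) reference recursion for A's dfs / inner loop.
mutual
def Rf (s : List Int) (n cap idx total : Int) : Bool :=
  if total = 0 then true
  else if total < 0 then false
  else if _h : n ≤ idx then false
  else Lf s n cap total (idx + 1)
termination_by (n - idx).toNat * 2 + 1
decreasing_by all_goals omega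

def Lf (s : List Int) (n cap total i : Int) : Bool :=
  if _h : i < n then
    if Rf s n cap i (total - min (PySem.List.pyGetD s i 0) cap) then true
    else Lf s n cap total (i + 1)
  else false
termination_by (n - i).toNat * 2 + 2
decreasing_by all_goals omega
end

-- Memoization soundness: with a correct memo, dfsA computes Rf and keeps the memo correct.
mutual
theorem dfsA_correct (s : List Int) (n cap idx total : Int) (dp : PySem.Dict (Int × Int) Bool)
    (hInv : ∀ p b, dp.get? p = some b → b = Rf s n cap p.1 p.2) :
    (dfsA s n cap idx total dp).1 = Rf s n cap idx total ∧
    (∀ p b, (dfsA s n cap idx total dp).2.get? p = some b → b = Rf s n cap p.1 p.2) := by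
  rw [dfsA]
  by_cases h0 : total = 0
  · rw [if_pos h0, Rf, if_pos h0]
    exact ⟨rfl, hInv⟩
  · rw [if_neg h0]
    by_cases h1 : total < 0
    · rw [if_pos h1, Rf, if_neg h0, if_pos h1]
      exact ⟨rfl, hInv⟩
    · rw [if_neg h1]
      by_cases h2 : n ≤ idx
      · rw [dif_pos h2, Rf, if_neg h0, if_neg h1, dif_pos h2]
        exact ⟨rfl, hInv⟩
      · rw [dif_neg h2]
        have hR : Rf s n cap idx total = Lf s n cap total (idx + 1) := by
          rw [Rf, if_neg h0, if_neg h1, dif_neg h2]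
        cases hget : dp.get? (idx, total) with
        | some b =>
          have hb := hInv (idx, total) b hget
          exact ⟨hb, hInv⟩
        | none =>
          obtain ⟨ha, hinv'⟩ := loopA_correct s n cap idx total (idx + 1) dp hInv hR
          exact ⟨ha.trans hR.symm, hinv'⟩
termination_by (n - idx).toNat * 2 + 1
decreasing_by all_goals omega

theorem loopA_correct (s : List Int) (n cap idx total i : Int) (dp : PySem.Dict (Int × Int) Bool)
    (hInv : ∀ p b, dp.get? p = some b → b = Rf s n cap p.1 p.2)
    (hR : Rf s n cap idx total = Lf s n cap total i) :
    (loopA s n cap idx total i dp).1 = Lf s n cap total i ∧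
    (∀ p b, (loopA s n cap idx total i dp).2.get? p = some b → b = Rf s n cap p.1 p.2) := by
  rw [loopA]
  by_cases h : i < n
  · rw [dif_pos h]
    obtain ⟨hr1, hr2⟩ := dfsA_correct s n cap i (total - min (PySem.List.pyGetD s i 0) cap) dp hInv
    have hLf : Lf s n cap total i =
        if Rf s n cap i (total - min (PySem.List.pyGetD s i 0) cap) then true
        else Lf s n cap total (i + 1) := by
      rw [Lf, dif_pos h]
    by_cases hb : (dfsA s n cap i (total - min (PySem.List.pyGetD s i 0) cap) dp).1 = true
    · simp only [hb, if_pos]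
      have hRfi : Rf s n cap i (total - min (PySem.List.pyGetD s i 0) cap) = true := by
        rw [← hr1]; exact hb
      have hRt : Rf s n cap idx total = true := by
        rw [hR, hLf, hRfi]; simp
      constructor
      · simp only [PySem.Dict.get?_insert_self, Option.getD_some]
        rw [← hR, hRt]
      · intro p b hpb
        rw [PySem.Dict.get?_insert] at hpb
        split at hpb
        · rename_i hpeq
          subst hpeq
          simp only [Option.some.injEq] at hpb
          rw [← hpb]
          exact hRt.symm
        · exact hr2 p b hpb
    · simp only [Bool.not_eq_true] at hb
      simp only [hb, Bool.false_eq_true, if_false]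
      have hRfi : Rf s n cap i (total - min (PySem.List.pyGetD s i 0) cap) = false := by
        rw [← hr1]; exact hb
      have hR' : Rf s n cap idx total = Lf s n cap total (i + 1) := by
        rw [hR, hLf, hRfi]; simp
      rw [show Lf s n cap total i = Lf s n cap total (i + 1) by rw [hLf, hRfi]; simp]
      exact loopA_correct s n cap idx total (i + 1) _ hr2 hR'
  · rw [dif_neg h]
    have hLf : Lf s n cap total i = false := by
      rw [Lf, dif_neg h]
    constructor
    · simp only [PySem.Dict.get?_insert_self, Option.getD_some, hLf]
    · intro p b hpb
      rw [PySem.Dict.get?_insert] at hpb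
      split at hpb
      · rename_i hpeq
        subst hpeq
        simp only [Option.some.injEq] at hpb
        rw [← hpb, hR, hLf]
      · exact hInv p b hpb
termination_by (n - i).toNat * 2 + 2
decreasing_by all_goals omega
end

-- Take/skip recursion over the capped value list (the search seen from B's side).
def Gf (l : List Int) (t : Int) : Bool :=
  if t = 0 then true
  else if t < 0 then false
  else
    match l with
    | [] => false
    | v :: rest => Gf rest (t - v) || Gf rest t

-- Choose-the-first-element recursion (the search seen from A's inner loop).
def Hf (l : List Int) (t : Int) : Bool :=
  match l with
  | [] => false
  | v :: rest => Gf rest (t - v) || Hf rest t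

theorem Gf_eq_Hf (l : List Int) (t : Int) (ht : 0 < t) : Gf l t = Hf l t := by
  induction l generalizing t with
  | nil => rw [Gf]; simp [Hf, show ¬(t=0) by omega, show ¬(t<0) by omega]
  | cons v rest ih =>
    rw [Gf, if_neg (by omega), if_neg (by omega), Hf, ih t ht]

theorem Lf_eq_Hf (s : List Int) (n cap : Int) (hn : n = (s.length : Int)) :
    ∀ (m : Nat) (i : Int), 0 ≤ i → (n - i).toNat = m →
    ∀ t, Lf s n cap t i = Hf ((s.map (fun v => min v cap)).drop i.toNat) t := by
  intro m
  induction m using Nat.strong_induction_on with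
  | _ m ihm =>
    intro i hi hm t
    rw [Lf]
    by_cases h : i < n
    · rw [dif_pos h]
      have hlen : i.toNat < s.length := by omega
      have hget : PySem.List.pyGetD s i 0 = s[i.toNat] := PySem.List.pyGetD_eq_getElem s 0 hi (by omega)
      have hdrop : (s.map (fun v => min v cap)).drop i.toNat
          = (min s[i.toNat] cap) :: (s.map (fun v => min v cap)).drop (i.toNat + 1) := by
        rw [List.drop_eq_getElem_cons (by simpa using hlen)]
        simp
      have hL : Lf s n cap t (i + 1) = Hf ((s.map (fun v => min v cap)).drop (i + 1).toNat) t :=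
        ihm ((n - (i + 1)).toNat) (by omega) (i + 1) (by omega) rfl t
      have hi1 : (i + 1).toNat = i.toNat + 1 := by omega
      have key : ∀ t', Rf s n cap i t' = Gf ((s.map (fun v => min v cap)).drop (i.toNat + 1)) t' := by
        intro t'
        rw [Rf]
        by_cases h0 : t' = 0
        · rw [if_pos h0, Gf.eq_def, if_pos h0]
        · rw [if_neg h0]
          by_cases h1 : t' < 0
          · rw [if_pos h1, Gf.eq_def, if_neg h0, if_pos h1]
          · rw [if_neg h1, dif_neg (by omega)]
            have := ihm ((n - (i + 1)).toNat) (by omega) (i + 1) (by omega) rfl t'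
            rw [this, hi1, Gf_eq_Hf _ _ (by omega)]
      rw [hget, key, hdrop, Hf, hL, hi1]
      cases hg : Gf ((s.map (fun v => min v cap)).drop (i.toNat + 1)) (t - min s[i.toNat] cap) <;> simp
    · rw [dif_neg h]
      rw [List.drop_eq_nil_of_le (by simp; omega)]
      rfl

theorem Rf_eq_Gf (s : List Int) (n cap : Int) (hn : n = (s.length : Int))
    (idx : Int) (hidx : -1 ≤ idx) (t : Int) :
    Rf s n cap idx t = Gf ((s.map (fun v => min v cap)).drop (idx + 1).toNat) t := by
  rw [Rf]
  by_cases h0 : t = 0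
  · rw [if_pos h0, Gf.eq_def, if_pos h0]
  · rw [if_neg h0]
    by_cases h1 : t < 0
    · rw [if_pos h1, Gf.eq_def, if_neg h0, if_pos h1]
    · rw [if_neg h1]
      by_cases h2 : n ≤ idx
      · rw [dif_pos h2]
        rw [List.drop_eq_nil_of_le (by simp; omega), Gf.eq_def, if_neg h0, if_neg h1]
      · rw [dif_neg h2]
        rw [Lf_eq_Hf s n cap hn ((n - (idx+1)).toNat) (idx+1) (by omega) rfl t,
            Gf_eq_Hf _ _ (by omega)]

-- Characterization of Gf: a sublist summing to t with every prefix sum ≤ t.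
theorem Gf_iff (l : List Int) (t : Int) :
    Gf l t = true ↔ ∃ w : List Int, w.Sublist l ∧ w.sum = t ∧ ∀ j : Nat, (w.take j).sum ≤ t := by
  induction l generalizing t with
  | nil =>
    rw [Gf]
    constructor
    · intro h
      have h0 : t = 0 := by
        by_contra h0
        rw [if_neg h0] at h
        split_ifs at h
      exact ⟨[], List.Sublist.refl _, by simp [h0], by simp [h0]⟩
    · rintro ⟨w, hw, hsum, hpre⟩
      rw [List.sublist_nil] at hw
      subst hw
      simp at hsum
      simp [← hsum]
  | cons v rest ih =>
    rw [Gf]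
    split_ifs with h0 h1
    · constructor
      · intro _
        exact ⟨[], List.nil_sublist _, by simp [h0], by simp [h0]⟩
      · simp
    · constructor
      · simp
      · rintro ⟨w, hw, hsum, hpre⟩
        have := hpre 0
        simp at this
        omega
    · have ht : 0 < t := by omega
      simp only [Bool.or_eq_true, ih]
      constructor
      · rintro (⟨w, hw, hsum, hpre⟩ | ⟨w, hw, hsum, hpre⟩)
        · refine ⟨v :: w, List.cons_sublist_cons.mpr hw, by simp [hsum], ?_⟩
          intro j
          cases j with
          | zero => simpa using ht.le
          | succ j =>
            have := hpre j
            simp [List.take_succ_cons]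
            omega
        · exact ⟨w, hw.cons v, hsum, hpre⟩
      · rintro ⟨w, hw, hsum, hpre⟩
        rcases List.sublist_cons_iff.mp hw with hw' | ⟨w', rfl, hw'⟩
        · exact Or.inr ⟨w, hw', hsum, hpre⟩
        · refine Or.inl ⟨w', hw', by simp at hsum; omega, ?_⟩
          intro j
          have := hpre (j + 1)
          simp [List.take_succ_cons] at this
          simp at hsum
          omega


-- Characterization of B's fold (over the already-capped list), from an arbitrary start set.
theorem fold_mem (k : Int) (L : List Int) (S : List Int) (p : Int) :
    p ∈ L.foldl (fun S v =>
      PySem.Set.union S ((S.filter (fun s => decide (s + v ≤ k))).map (fun s => s + v))) S ↔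
    ∃ q ∈ S, ∃ w : List Int, w.Sublist L ∧ p = q + w.sum ∧
      ∀ j : Nat, 1 ≤ j → j ≤ w.length → q + (w.take j).sum ≤ k := by
  induction L generalizing S with
  | nil =>
    simp only [List.foldl_nil]
    constructor
    · intro hp
      exact ⟨p, hp, [], List.nil_sublist _, by simp, by intro j h1 h2; simp at h2; omega⟩
    · rintro ⟨q, hq, w, hw, rfl, hpre⟩
      rw [List.sublist_nil] at hw
      subst hw
      simpa using hq
  | cons v L ih =>
    simp only [List.foldl_cons, ih]
    constructor
    · rintro ⟨q', hq', w', hw', rfl, hpre'⟩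
      rw [PySem.Set.mem_union] at hq'
      rcases hq' with hq' | hq'
      · exact ⟨q', hq', w', hw'.cons v, rfl, hpre'⟩
      · simp only [List.mem_map, List.mem_filter, decide_eq_true_eq] at hq'
        rcases hq' with ⟨q, ⟨hq, hqk⟩, rfl⟩
        refine ⟨q, hq, v :: w', List.cons_sublist_cons.mpr hw', by simp; ring, ?_⟩
        intro j h1 h2
        cases j with
        | zero => omega
        | succ j =>
          cases Nat.eq_zero_or_pos j with
          | inl hj => subst hj; simpa using hqk
          | inr hj =>
            have := hpre' j hj (by simpa using h2)
            simp [List.take_succ_cons]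
            omega
    · rintro ⟨q, hq, w, hw, rfl, hpre⟩
      rcases List.sublist_cons_iff.mp hw with hw' | ⟨w', rfl, hw'⟩
      · exact ⟨q, (PySem.Set.mem_union _ _ _).mpr (Or.inl hq), w, hw', rfl, hpre⟩
      · have hqk : q + v ≤ k := by simpa using hpre 1 le_rfl (by simp)
        refine ⟨q + v, (PySem.Set.mem_union _ _ _).mpr (Or.inr ?_), w', hw', by simp; ring, ?_⟩
        · simp only [List.mem_map, List.mem_filter, decide_eq_true_eq]
          exact ⟨q, ⟨hq, hqk⟩, rfl⟩
        · intro j h1 h2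
          have := hpre (j + 1) (by omega) (by simpa using h2)
          simp [List.take_succ_cons] at this
          omega


theorem fold_nil_start (k : Int) (L : List Int) :
    L.foldl (fun S v =>
      PySem.Set.union S ((S.filter (fun s => decide (s + v ≤ k))).map (fun s => s + v))) [] = [] := by
  induction L with
  | nil => rfl
  | cons v L ih => simpa using ih

-- Per-cap equality of the two programs.
theorem percap (s : List Int) (n cap k : Int) (hn : n = (s.length : Int)) :
    (dfsA s n cap (-1) k PySem.Dict.empty).1 =
    PySem.Set.contains
      (s.foldl (fun sums v =>
          PySem.Set.union sums ((sums.filter (fun q => decide (q + min v cap ≤ k))).map (fun q => q + min v cap)))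
        (if 0 ≤ k then PySem.Set.ofList [0] else PySem.Set.empty)) k := by
  have hInv : ∀ p b, (PySem.Dict.empty : PySem.Dict (Int × Int) Bool).get? p = some b →
      b = Rf s n cap p.1 p.2 := by
    intro p b hpb
    simp [PySem.Dict.get?_empty] at hpb
  obtain ⟨h1, _⟩ := dfsA_correct s n cap (-1) k PySem.Dict.empty hInv
  rw [h1, Rf_eq_Gf s n cap hn (-1) le_rfl k]
  have hfold : s.foldl (fun sums v =>
          PySem.Set.union sums ((sums.filter (fun q => decide (q + min v cap ≤ k))).map (fun q => q + min v cap)))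
        (if 0 ≤ k then PySem.Set.ofList [0] else PySem.Set.empty)
      = (s.map (fun v => min v cap)).foldl (fun sums w =>
          PySem.Set.union sums ((sums.filter (fun q => decide (q + w ≤ k))).map (fun q => q + w)))
        (if 0 ≤ k then PySem.Set.ofList [0] else PySem.Set.empty) :=
    (List.foldl_map (f := fun v => min v cap)
      (g := fun (sums : PySem.Set Int) (w : Int) =>
        PySem.Set.union sums ((sums.filter (fun q => decide (q + w ≤ k))).map (fun q => q + w)))
      (l := s) (init := if 0 ≤ k then PySem.Set.ofList [0] else PySem.Set.empty)).symm
  rw [hfold]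
  have h0 : ((-1 : Int) + 1).toNat = 0 := by omega
  rw [h0, List.drop_zero]
  rw [Bool.eq_iff_iff]
  by_cases hk : 0 ≤ k
  · rw [if_pos hk]
    have hofl : PySem.Set.ofList [(0 : Int)] = [(0 : Int)] := rfl
    rw [hofl, Gf_iff, PySem.Set.contains_iff, fold_mem]
    constructor
    · rintro ⟨w, hw, hsum, hpre⟩
      refine ⟨0, by simp, w, hw, by omega, ?_⟩
      intro j _ _
      have := hpre j
      omega
    · rintro ⟨q, hq, w, hw, hsum, hpre⟩
      simp only [List.mem_singleton] at hq
      subst hq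
      refine ⟨w, hw, by omega, ?_⟩
      intro j
      by_cases hj : 1 ≤ j ∧ j ≤ w.length
      · have := hpre j hj.1 hj.2
        omega
      · by_cases hj0 : j = 0
        · subst hj0; simpa using hk
        · have hjl : w.length ≤ j := by omega
          rw [List.take_of_length_le hjl]
          omega
  · rw [if_neg hk, show (PySem.Set.empty : PySem.Set Int) = [] from rfl, fold_nil_start]
    constructor
    · intro hg
      exfalso
      rw [Gf.eq_def, if_neg (by omega), if_pos (by omega)] at hg
      simp at hg
    · intro hc
      simp [PySem.Set.contains] at hc

-- ===== VERDICT (by name: the statement is the Claim_ definition above) =====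
theorem subsequenceSumAfterCapping_spec : Claim_equal_subsequenceSumAfterCapping := by
  intro nums k _
  unfold Spec_subsequenceSumAfterCapping subsequenceSumAfterCapping subsequenceSumAfterCapping_alt
  refine List.map_congr_left ?_
  intro cap _
  exact percap (PySem.List.sorted nums (fun x => x) false) (nums.length : Int) cap k
    (by simp [PySem.List.length_sorted])
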